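-- pv_equiv track=rewrite | github.com/kfuku52/kfbatch | kfbatch/stat.py | _split_scontrol_node_blocks
-- ===== SOURCE A (Python) =====
-- def _split_scontrol_node_blocks(lines):
--     blocks = []
--     current = ''
--     for raw_line in lines:
--         line = raw_line.strip()
--         if line=='':
--             if current!='':
--                 blocks.append(current.strip())
--                 current = ''
--             continue
--         if ('NodeName=' in line) and (current!=''):
--             blocks.append(current.strip())
--             current = line
--             continue
--         if current=='':
--             current = line
--         else:
--             current += ' ' + line
--     if current!='':
--         blocks.append(current.strip())
--     return blocks
-- ===== SOURCE B (Python) =====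
-- def _split_scontrol_node_blocks(lines):
--     # Phase 1: strip lines and partition into blank-line-delimited segments.
--     segments = []
--     seg = []
--     for raw_line in lines:
--         line = raw_line.strip()
--         if line == '':
--             if seg:
--                 segments.append(seg)
--                 seg = []
--         else:
--             seg.append(line)
--     if seg:
--         segments.append(seg)
--     # Phase 2: split each segment at 'NodeName=' lines and join sub-blocks.
--     blocks = []
--     for segment in segments:
--         sub = []
--         for line in segment:
--             if ('NodeName=' in line) and sub:
--                 blocks.append(' '.join(sub))
--                 sub = [line]
--             else:
--                 sub.append(line)
--         blocks.append(' '.join(sub))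
--     return blocks
-- ===== Notes on version B (the rewrite author's own statement) =====
-- stated objective: alternative
-- what changed: Replaces A's single string-accumulating state machine with a two-phase pipeline: partition the stripped lines into blank-delimited segments (lists of lines), then split each segment at 'NodeName=' lines and ' '.join the sub-blocks, so no incremental string concatenation or re-stripping happens.
import Mathlib
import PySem

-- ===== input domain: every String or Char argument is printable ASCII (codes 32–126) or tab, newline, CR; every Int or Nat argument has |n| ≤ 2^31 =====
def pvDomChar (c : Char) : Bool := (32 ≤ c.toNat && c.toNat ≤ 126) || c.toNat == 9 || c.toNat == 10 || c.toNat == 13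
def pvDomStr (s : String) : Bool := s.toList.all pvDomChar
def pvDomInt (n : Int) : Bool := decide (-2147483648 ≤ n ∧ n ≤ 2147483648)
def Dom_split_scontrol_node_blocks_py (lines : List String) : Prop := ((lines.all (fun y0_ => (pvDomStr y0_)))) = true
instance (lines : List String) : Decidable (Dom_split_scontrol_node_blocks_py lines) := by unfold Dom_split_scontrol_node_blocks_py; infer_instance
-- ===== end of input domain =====

-- B re-implements A's single string-accumulating state machine as a two-phase pipeline
-- (blank-delimited segments of stripped lines, then per-segment splitting at 'NodeName='
-- lines with ' '.join); return values proved equal on all inputs.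


-- ===== PORT A =====
-- Python str concatenation '+', ported exactly as append on code points
def pvCat (s t : String) : String := String.ofList (s.toList ++ t.toList)

-- loop body of A: state = (blocks, current)
def pvStepA (st : List String × String) (raw_line : String) : List String × String :=
  let line := PySem.Str.strip raw_line
  if line = "" then
    (if st.2 ≠ "" then (st.1 ++ [PySem.Str.strip st.2], "") else st)
  else if PySem.Str.isIn "NodeName=" line = true ∧ st.2 ≠ "" then
    (st.1 ++ [PySem.Str.strip st.2], line)
  else if st.2 = "" then (st.1, line)
  else (st.1, pvCat (pvCat st.2 " ") line)

def split_scontrol_node_blocks_py (lines : List String) : List String :=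
  let st := lines.foldl pvStepA ([], "")
  if st.2 ≠ "" then st.1 ++ [PySem.Str.strip st.2] else st.1

-- ===== PORT B =====
-- phase-1 loop body: state = (segments, seg)
def pvStepSeg (st : List (List String) × List String) (raw_line : String) :
    List (List String) × List String :=
  let line := PySem.Str.strip raw_line
  if line = "" then (if st.2 ≠ [] then (st.1 ++ [st.2], []) else st)
  else (st.1, st.2 ++ [line])

-- phase-2 inner loop body: state = (blocks, sub)
def pvStepSub (st : List String × List String) (line : String) : List String × List String :=
  if PySem.Str.isIn "NodeName=" line = true ∧ st.2 ≠ [] then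
    (st.1 ++ [PySem.Str.join " " st.2], [line])
  else (st.1, st.2 ++ [line])

-- phase-2 body for one segment
def pvProcSeg (blocks : List String) (segment : List String) : List String :=
  let q := segment.foldl pvStepSub (blocks, [])
  q.1 ++ [PySem.Str.join " " q.2]

def split_scontrol_node_blocks_py_alt (lines : List String) : List String :=
  let p := lines.foldl pvStepSeg ([], [])
  let segments := if p.2 ≠ [] then p.1 ++ [p.2] else p.1
  segments.foldl pvProcSeg []

-- ===== PRECONDITION & SPEC =====
def Spec_split_scontrol_node_blocks_py (lines : List String) (out : List String) : Prop := out = split_scontrol_node_blocks_py_alt lines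
instance (lines : List String) (out : List String) : Decidable (Spec_split_scontrol_node_blocks_py lines out) := by unfold Spec_split_scontrol_node_blocks_py; infer_instance

-- ===== CLAIM (what is proved, stated in full; the proofs are below) =====
def Claim_equal_split_scontrol_node_blocks_py : Prop := ∀ (lines : List String), Dom_split_scontrol_node_blocks_py lines → Spec_split_scontrol_node_blocks_py lines (split_scontrol_node_blocks_py lines)

-- ===== LEMMAS AND PROOFS =====

-- intermediate single-pass machine: A's loop, with 'current' kept as the LIST of its lines
def pvStepC (st : List String × List String) (raw_line : String) : List String × List String :=
  let line := PySem.Str.strip raw_line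
  if line = "" then
    (if st.2 ≠ [] then (st.1 ++ [PySem.Str.join " " st.2], []) else st)
  else pvStepSub st line

-- characters with no leading/trailing whitespace
def pvEdgeOK (cs : List Char) : Prop :=
  (∀ c ∈ cs.head?, PySem.Chars.isspace c = false) ∧
  (∀ c ∈ cs.getLast?, PySem.Chars.isspace c = false)

def pvGoodS (s : String) : Prop := s.toList ≠ [] ∧ pvEdgeOK s.toList

lemma pv_head?_dropWhile (p : Char → Bool) (l : List Char) :
    ∀ c ∈ (l.dropWhile p).head?, p c = false := by
  induction l with
  | nil => simp
  | cons a t ih =>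
    by_cases h : p a
    · simpa [List.dropWhile_cons, h] using ih
    · simp [h]

lemma pv_lstrip_eq_self (cs : List Char)
    (h : ∀ c ∈ cs.head?, PySem.Chars.isspace c = false) :
    PySem.Chars.lstrip cs = cs := by
  cases cs with
  | nil => rfl
  | cons a t =>
    have := h a (by simp)
    simp [PySem.Chars.lstrip, this]

lemma pv_rstrip_eq_self (cs : List Char)
    (h : ∀ c ∈ cs.getLast?, PySem.Chars.isspace c = false) :
    PySem.Chars.rstrip cs = cs := by
  have h' : ∀ c ∈ cs.reverse.head?, PySem.Chars.isspace c = false := by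
    simpa [List.head?_reverse] using h
  have hd : List.dropWhile PySem.Chars.isspace cs.reverse = cs.reverse := by
    cases hrev : cs.reverse with
    | nil => simp
    | cons a t =>
      have := h' a (by simp [hrev])
      simp [this]
  simp [PySem.Chars.rstrip, hd]

lemma pv_strip_eq_self (cs : List Char) (h : pvEdgeOK cs) :
    PySem.Chars.strip cs = cs := by
  unfold PySem.Chars.strip
  rw [pv_lstrip_eq_self cs h.1, pv_rstrip_eq_self cs h.2]

lemma pv_edgeOK_strip (cs : List Char) : pvEdgeOK (PySem.Chars.strip cs) := by
  constructor
  · intro c hc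
    -- strip cs = rstrip (lstrip cs), and rstrip l is a prefix of l
    have hpre : PySem.Chars.rstrip (PySem.Chars.lstrip cs) <+: PySem.Chars.lstrip cs := by
      unfold PySem.Chars.rstrip
      have hsuf : List.dropWhile PySem.Chars.isspace (PySem.Chars.lstrip cs).reverse
          <:+ (PySem.Chars.lstrip cs).reverse := List.dropWhile_suffix _
      simpa using hsuf.reverse
    obtain ⟨t, ht⟩ := hpre
    have hcl : (PySem.Chars.lstrip cs).head? = some c := by
      rw [← ht]
      cases hx : PySem.Chars.rstrip (PySem.Chars.lstrip cs) with
      | nil =>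
        rw [show PySem.Chars.strip cs = PySem.Chars.rstrip (PySem.Chars.lstrip cs) from rfl, hx] at hc
        simp at hc
      | cons a s =>
        rw [show PySem.Chars.strip cs = PySem.Chars.rstrip (PySem.Chars.lstrip cs) from rfl, hx] at hc
        simp at hc
        simp [hc]
    exact pv_head?_dropWhile PySem.Chars.isspace cs c (by simpa [PySem.Chars.lstrip] using hcl)
  · intro c hc
    have h2 : (List.dropWhile PySem.Chars.isspace (PySem.Chars.lstrip cs).reverse).head? = some c := by
      have := hc
      simp [PySem.Chars.strip, PySem.Chars.rstrip, List.getLast?_reverse] at this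
      simpa [List.head?_reverse] using this
    exact pv_head?_dropWhile PySem.Chars.isspace _ c h2

lemma pv_join_append_singleton (sep : List Char) (p : List (List Char)) (l : List Char)
    (hp : p ≠ []) :
    PySem.Chars.join sep (p ++ [l]) = PySem.Chars.join sep p ++ sep ++ l := by
  induction p with
  | nil => exact absurd rfl hp
  | cons a t ih =>
    cases t with
    | nil =>
      simp [PySem.Chars.join_cons_cons, PySem.Chars.join_singleton]
    | cons b u =>
      have hih := ih (by simp)
      have h1 : (a :: b :: u) ++ [l] = a :: ((b :: u) ++ [l]) := rfl
      rw [h1]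
      have h2 : (b :: u) ++ [l] = b :: (u ++ [l]) := rfl
      rw [h2, PySem.Chars.join_cons_cons, ← h2, hih, PySem.Chars.join_cons_cons]
      simp [List.append_assoc]

lemma pv_join_ne_nil (sep : List Char) (p : List (List Char)) (hp : p ≠ [])
    (hx : ∀ x ∈ p, x ≠ []) : PySem.Chars.join sep p ≠ [] := by
  cases p with
  | nil => exact absurd rfl hp
  | cons a t =>
    cases t with
    | nil =>
      simpa [PySem.Chars.join_singleton] using hx a (by simp)
    | cons b u =>
      rw [PySem.Chars.join_cons_cons]
      have := hx a (by simp)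
      simp [this]

lemma pv_edgeOK_join (p : List (List Char)) (hp : p ≠ [])
    (hx : ∀ x ∈ p, x ≠ [] ∧ pvEdgeOK x) : pvEdgeOK (PySem.Chars.join [' '] p) := by
  induction p with
  | nil => exact absurd rfl hp
  | cons a t ih =>
    cases t with
    | nil =>
      simpa [PySem.Chars.join_singleton] using (hx a (by simp)).2
    | cons b u =>
      have ha := hx a (by simp)
      have hrest : ∀ x ∈ b :: u, x ≠ [] ∧ pvEdgeOK x := fun x hxm => hx x (by simp [hxm])
      have hjr := ih (by simp) hrest
      have hjne : PySem.Chars.join [' '] (b :: u) ≠ [] :=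
        pv_join_ne_nil [' '] (b :: u) (by simp) (fun x hxm => (hrest x hxm).1)
      rw [PySem.Chars.join_cons_cons]
      constructor
      · intro c hc
        rw [List.append_assoc, List.head?_append] at hc
        cases hha : a.head? with
        | none =>
          cases a with
          | nil => exact absurd rfl ha.1
          | cons x s => simp at hha
        | some d =>
          rw [hha] at hc
          simp at hc
          exact hc ▸ ha.2.1 d (by simp [hha])
      · intro c hc
        rw [List.getLast?_append] at hc
        cases hgl2 : (PySem.Chars.join [' '] (b :: u)).getLast? with
        | none => exact absurd (List.getLast?_eq_none_iff.mp hgl2) hjne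
        | some d =>
          rw [hgl2] at hc
          simp at hc
          exact hc ▸ hjr.2 d (by simp [hgl2])

-- string-level bridges
lemma pv_toList_eq_nil_iff (s : String) : s.toList = [] ↔ s = "" := by
  constructor
  · intro h; apply String.toList_inj.mp; simp [h]
  · intro h; simp [h]

def pvJoinS (p : List String) : String := PySem.Str.join " " p

lemma pv_toList_joinS (p : List String) :
    (pvJoinS p).toList = PySem.Chars.join [' '] (p.map String.toList) := by
  rw [pvJoinS, PySem.Str.toList_join]
  rfl

lemma pvJoinS_nil : pvJoinS [] = "" := by
  apply String.toList_inj.mp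
  simp [pv_toList_joinS, PySem.Chars.join_nil]

lemma pvJoinS_singleton (x : String) : pvJoinS [x] = x := by
  apply String.toList_inj.mp
  simp [pv_toList_joinS, PySem.Chars.join_singleton]

lemma pvJoinS_ne (p : List String) (hp : p ≠ []) (hg : ∀ x ∈ p, pvGoodS x) :
    pvJoinS p ≠ "" := by
  intro h
  have := (pv_toList_eq_nil_iff (pvJoinS p)).mpr h
  rw [pv_toList_joinS] at this
  exact pv_join_ne_nil [' '] (p.map String.toList) (by simpa using hp)
    (by intro x hxm
        obtain ⟨y, hy, rfl⟩ := List.mem_map.mp hxm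
        exact (hg y hy).1) this

lemma pvJoinS_append (p : List String) (l : String) (hp : p ≠ []) :
    pvJoinS (p ++ [l]) = pvCat (pvCat (pvJoinS p) " ") l := by
  apply String.toList_inj.mp
  rw [pv_toList_joinS]
  simp only [pvCat, String.toList_ofList, List.map_append, List.map_cons, List.map_nil]
  rw [pv_join_append_singleton [' '] (p.map String.toList) l.toList (by simpa using hp)]
  rw [pv_toList_joinS]
  rfl

lemma pv_strip_joinS (p : List String) (hp : p ≠ []) (hg : ∀ x ∈ p, pvGoodS x) :
    PySem.Str.strip (pvJoinS p) = pvJoinS p := by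
  apply String.toList_inj.mp
  rw [PySem.Str.toList_strip, pv_toList_joinS]
  exact pv_strip_eq_self _ (pv_edgeOK_join (p.map String.toList) (by simpa using hp)
    (by intro x hxm
        obtain ⟨y, hy, rfl⟩ := List.mem_map.mp hxm
        exact ⟨(hg y hy).1, (hg y hy).2⟩))

lemma pvGood_of_strip (raw : String) (h : PySem.Str.strip raw ≠ "") :
    pvGoodS (PySem.Str.strip raw) := by
  refine ⟨fun hc => h ((pv_toList_eq_nil_iff _).mp hc), ?_⟩
  rw [PySem.Str.toList_strip]
  exact pv_edgeOK_strip raw.toList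

-- one step of A matches one step of C (current = ' '.join(pending))
lemma pvJoinS_def (p : List String) : pvJoinS p = PySem.Str.join " " p := rfl

lemma pvStepAC (blocks pending : List String) (raw : String)
    (hg : ∀ x ∈ pending, pvGoodS x) :
    pvStepA (blocks, pvJoinS pending) raw =
      ((pvStepC (blocks, pending) raw).1, pvJoinS (pvStepC (blocks, pending) raw).2) ∧
    ∀ x ∈ (pvStepC (blocks, pending) raw).2, pvGoodS x := by
  by_cases hline : PySem.Str.strip raw = ""
  · by_cases hpend : pending = []
    · subst hpend
      simp [pvStepA, pvStepC, hline, pvJoinS_nil]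
    · have hcur : pvJoinS pending ≠ "" := pvJoinS_ne pending hpend hg
      simp [pvStepA, pvStepC, hline, hpend, hcur,
        pv_strip_joinS pending hpend hg, pvJoinS_nil, ← pvJoinS_def]
  · by_cases hin : PySem.Chars.isIn ['N','o','d','e','N','a','m','e','='] (PySem.Chars.strip raw.toList) = true
    · by_cases hpend : pending = []
      · subst hpend
        constructor
        · simp [pvStepA, pvStepC, pvStepSub, hline, hin, pvJoinS_nil, pvJoinS_singleton]
        · simp [pvStepC, pvStepSub, hline, hin]
          exact pvGood_of_strip raw hline
      · have hcur : pvJoinS pending ≠ "" := pvJoinS_ne pending hpend hg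
        constructor
        · simp [pvStepA, pvStepC, pvStepSub, hline, hin, hpend, hcur,
            pv_strip_joinS pending hpend hg, pvJoinS_singleton, ← pvJoinS_def]
        · simp [pvStepC, pvStepSub, hline, hin, hpend]
          exact pvGood_of_strip raw hline
    · by_cases hpend : pending = []
      · subst hpend
        constructor
        · simp [pvStepA, pvStepC, pvStepSub, hline, hin, pvJoinS_nil, pvJoinS_singleton]
        · simp [pvStepC, pvStepSub, hline, hin]
          exact pvGood_of_strip raw hline
      · have hcur : pvJoinS pending ≠ "" := pvJoinS_ne pending hpend hg
        constructor
        · simp [pvStepA, pvStepC, pvStepSub, hline, hin, hpend, hcur,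
            pvJoinS_append pending (PySem.Str.strip raw) hpend, ← pvJoinS_def]
        · simp [pvStepC, pvStepSub, hline, hin, hpend]
          intro x hx
          rcases hx with hx | rfl
          · exact hg x hx
          · exact pvGood_of_strip raw hline

lemma pvAC (lines : List String) : ∀ (blocks pending : List String),
    (∀ x ∈ pending, pvGoodS x) →
    lines.foldl pvStepA (blocks, pvJoinS pending) =
      ((lines.foldl pvStepC (blocks, pending)).1,
        pvJoinS (lines.foldl pvStepC (blocks, pending)).2) ∧
    ∀ x ∈ (lines.foldl pvStepC (blocks, pending)).2, pvGoodS x := by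
  induction lines with
  | nil => intro blocks pending hg; exact ⟨rfl, hg⟩
  | cons raw rest ih =>
    intro blocks pending hg
    obtain ⟨hstep, hgood⟩ := pvStepAC blocks pending raw hg
    rw [List.foldl_cons, List.foldl_cons, hstep]
    exact ih (pvStepC (blocks, pending) raw).1 (pvStepC (blocks, pending) raw).2 hgood

-- phase-2 of B, folded over completed segments
def pvSegsOut (segs : List (List String)) : List String := segs.foldl pvProcSeg []

lemma pv_sub_ne (st : List String × List String) (seg : List String) (h : seg ≠ []) :
    (seg.foldl pvStepSub st).2 ≠ [] := by
  induction seg using List.reverseRecOn with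
  | nil => exact absurd rfl h
  | append_singleton s a _ =>
    rw [List.foldl_append]
    by_cases hc : PySem.Chars.isIn ['N','o','d','e','N','a','m','e','='] a.toList = true ∧ (s.foldl pvStepSub st).2 ≠ []
    · simp [pvStepSub, hc]
    · simp [pvStepSub, hc]

-- one step: C on the fused state matches B's phase-1 step
lemma pvStepCB (segs : List (List String)) (seg : List String) (raw : String) :
    pvStepC (seg.foldl pvStepSub (pvSegsOut segs, [])) raw =
      (pvStepSeg (segs, seg) raw).2.foldl pvStepSub
        (pvSegsOut (pvStepSeg (segs, seg) raw).1, []) := by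
  by_cases hline : PySem.Str.strip raw = ""
  · by_cases hseg : seg = []
    · subst hseg
      simp [pvStepC, pvStepSeg, hline]
    · have hP : (seg.foldl pvStepSub (pvSegsOut segs, [])).2 ≠ [] :=
        pv_sub_ne _ seg hseg
      have hsegs : pvSegsOut (segs ++ [seg]) =
          (seg.foldl pvStepSub (pvSegsOut segs, [])).1 ++
            [PySem.Str.join " " (seg.foldl pvStepSub (pvSegsOut segs, [])).2] := by
        simp [pvSegsOut, List.foldl_append, pvProcSeg]
      simp [pvStepC, pvStepSeg, hline, hseg, hP, hsegs]
  · simp [pvStepC, pvStepSeg, hline, List.foldl_append]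

lemma pvCB (lines : List String) : ∀ (segs : List (List String)) (seg : List String),
    lines.foldl pvStepC (seg.foldl pvStepSub (pvSegsOut segs, [])) =
      (lines.foldl pvStepSeg (segs, seg)).2.foldl pvStepSub
        (pvSegsOut (lines.foldl pvStepSeg (segs, seg)).1, []) := by
  induction lines with
  | nil => intro segs seg; rfl
  | cons raw rest ih =>
    intro segs seg
    rw [List.foldl_cons, pvStepCB segs seg raw, List.foldl_cons]
    exact ih (pvStepSeg (segs, seg) raw).1 (pvStepSeg (segs, seg) raw).2

-- ===== VERDICT (by name: the statement is the Claim_ definition above) =====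
theorem split_scontrol_node_blocks_py_spec : Claim_equal_split_scontrol_node_blocks_py := by
  intro lines _
  unfold Spec_split_scontrol_node_blocks_py
  obtain ⟨hAC, hgood⟩ := pvAC lines [] [] (by simp)
  have hCB := pvCB lines [] []
  simp only [pvSegsOut, List.foldl_nil] at hCB
  simp only [split_scontrol_node_blocks_py, split_scontrol_node_blocks_py_alt]
  rw [show (([], "") : List String × String) = ((([] : List String)), pvJoinS []) from by
    rw [pvJoinS_nil], hAC, hCB]
  rw [hCB] at hgood
  by_cases hp2 : (lines.foldl pvStepSeg ([], [])).2 = []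
  · simp [hp2, pvJoinS_nil]
  · have hne : ((lines.foldl pvStepSeg ([], [])).2.foldl pvStepSub
        ((lines.foldl pvStepSeg ([], [])).1.foldl pvProcSeg [], [])).2 ≠ [] :=
      pv_sub_ne _ _ hp2
    have hcur := pvJoinS_ne _ hne hgood
    have hstrip := pv_strip_joinS _ hne hgood
    simp [hp2, hcur, hstrip, List.foldl_append, pvProcSeg, ← pvJoinS_def]
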